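-- pv_equiv track=rewrite | github.com/shinybell/OpenAlex_app | utils/create_author_profile.py | get_career_earliest_year
-- ===== SOURCE A (Python) =====
-- from typing import List, Dict, Any
--
-- def get_career_earliest_year(detail_of_affiliation: List[Dict[str, Any]]) -> int:
--         """
--         institutions: 各辞書は 'Years' キーに年のリストを持つ
--         すべての 'Years' の中で最も古い年を返す
--         """
--         earliest = float('inf')
--         for inst in detail_of_affiliation:
--             years = inst.get("Years", [])
--             if years:
--                 # 現在の辞書内の最小の年を取得
--                 min_year = min(years)
--                 if min_year < earliest:
--                     earliest = min_year
--         # 該当する年がない場合は None を返す（ここでは int を返すことを前提）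
--         return earliest if earliest != float('inf') else None
-- ===== SOURCE B (Python) =====
-- def get_career_earliest_year(detail_of_affiliation):
--     years = sorted(y for inst in detail_of_affiliation for y in inst.get("Years", []))
--     return years[0] if years else None
-- ===== Notes on version B (the rewrite author's own statement) =====
-- stated objective: alternative
-- what changed: B gathers all years, sorts them, and returns the first element of the sorted list (None if empty) - sort-then-take-first instead of A's grouped per-dict min compared against a float('inf') running sentinel.
import Mathlib
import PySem

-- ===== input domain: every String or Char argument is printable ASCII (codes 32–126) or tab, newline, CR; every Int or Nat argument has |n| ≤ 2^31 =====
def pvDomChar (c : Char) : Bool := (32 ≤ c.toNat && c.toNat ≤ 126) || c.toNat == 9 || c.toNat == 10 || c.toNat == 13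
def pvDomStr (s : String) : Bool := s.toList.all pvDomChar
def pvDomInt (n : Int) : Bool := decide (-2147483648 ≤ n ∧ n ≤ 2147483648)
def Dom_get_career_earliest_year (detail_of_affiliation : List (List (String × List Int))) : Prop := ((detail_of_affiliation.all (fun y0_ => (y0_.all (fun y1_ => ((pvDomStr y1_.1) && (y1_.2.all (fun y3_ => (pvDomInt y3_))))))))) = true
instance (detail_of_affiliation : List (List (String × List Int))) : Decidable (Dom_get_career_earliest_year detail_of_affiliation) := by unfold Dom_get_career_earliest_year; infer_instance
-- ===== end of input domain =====

-- B sorts all gathered years and takes the first element (None if empty), instead of A's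
-- per-dict min compared against a float('inf') running sentinel. Objective: alternative.

-- ===== PORT A =====
-- running minimum: `none` plays the role of float('inf')
def get_career_earliest_year (detail_of_affiliation : List (List (String × List Int))) : Option Int :=
  detail_of_affiliation.foldl (fun earliest inst =>
    let years := (PySem.Dict.ofList inst).getD "Years" []
    match PySem.List.min? years (fun y => y) with
    | none => earliest
    | some min_year =>
      match earliest with
      | none => some min_year
      | some e => if min_year < e then some min_year else some e) none

-- ===== PORT B =====
def get_career_earliest_year_alt (detail_of_affiliation : List (List (String × List Int))) : Option Int :=
  let years := PySem.List.sorted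
    (detail_of_affiliation.flatMap (fun inst => (PySem.Dict.ofList inst).getD "Years" []))
    (fun y => y) false
  match years with
  | [] => none
  | y :: _ => some y

-- ===== PRECONDITION & SPEC =====
def Spec_get_career_earliest_year (detail_of_affiliation : List (List (String × List Int))) (out : Option Int) : Prop := out = get_career_earliest_year_alt detail_of_affiliation
instance (detail_of_affiliation : List (List (String × List Int))) (out : Option Int) : Decidable (Spec_get_career_earliest_year detail_of_affiliation out) := by unfold Spec_get_career_earliest_year; infer_instance

-- ===== CLAIM =====
def Claim_equal_get_career_earliest_year : Prop := ∀ (detail_of_affiliation : List (List (String × List Int))), Dom_get_career_earliest_year detail_of_affiliation → Spec_get_career_earliest_year detail_of_affiliation (get_career_earliest_year detail_of_affiliation)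

-- ===== LEMMAS AND PROOFS =====

/-- combine two optional minima (`none` = +∞). -/
def omin : Option Int → Option Int → Option Int
  | none, b => b
  | a, none => a
  | some x, some y => some (min x y)

theorem omin_none_right (a : Option Int) : omin a none = a := by cases a <;> rfl

theorem min?_id_nil : PySem.List.min? ([] : List Int) (fun y => y) = none := by
  simp [PySem.List.min?_eq_none_iff]

theorem omin_assoc (a b c : Option Int) : omin (omin a b) c = omin a (omin b c) := by
  cases a <;> cases b <;> cases c <;> simp [omin, min_assoc]

theorem min?_append (a b : List Int) :
    PySem.List.min? (a ++ b) (fun y => y) = omin (PySem.List.min? a (fun y => y)) (PySem.List.min? b (fun y => y)) := by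
  cases a with
  | nil => simp [min?_id_nil, omin]
  | cons x t =>
    cases b with
    | nil => simp [min?_id_nil, omin_none_right]
    | cons y s =>
      simp only [List.cons_append, PySem.List.min?_id_cons, List.foldl_append, omin]
      congr 1
      simp only [List.foldl_cons]
      rw [List.foldl_assoc]

/-- A's running-minimum fold equals the global min of the flattened years. -/
theorem foldl_eq_omin_min? (l : List (List (String × List Int))) (e : Option Int) :
    l.foldl (fun earliest inst =>
      let years := (PySem.Dict.ofList inst).getD "Years" []
      match PySem.List.min? years (fun y => y) with
      | none => earliest
      | some min_year =>
        match earliest with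
        | none => some min_year
        | some e => if min_year < e then some min_year else some e) e
    = omin e (PySem.List.min? (l.flatMap (fun inst => (PySem.Dict.ofList inst).getD "Years" [])) (fun y => y)) := by
  induction l generalizing e with
  | nil => simp [min?_id_nil, omin_none_right]
  | cons inst rest ih =>
    simp only [List.foldl_cons, List.flatMap_cons, ih, min?_append, ← omin_assoc]
    congr 1
    cases h : PySem.List.min? ((PySem.Dict.ofList inst).getD "Years" []) (fun y => y) with
    | none => simp [omin_none_right]
    | some m =>
      cases e with
      | none => simp [omin]
      | some e' =>
        simp only [omin]
        by_cases hlt : m < e'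
        · simp [hlt, min_comm, min_eq_left (le_of_lt hlt)]
        · simp [hlt, min_eq_left (not_lt.mp hlt)]

/-- the head of the sorted list is the global min. -/
theorem head_sorted_eq_min? (xs : List Int) (m : Int) (t : List Int)
    (h : PySem.List.sorted xs (fun y => y) false = m :: t) :
    PySem.List.min? xs (fun y => y) = some m := by
  have hxs : xs ≠ [] := by
    intro hnil
    rw [hnil, (PySem.List.sorted_eq_nil_iff ([] : List Int) (fun y => y) false).mpr rfl] at h
    exact absurd h.symm (List.cons_ne_nil m t)
  cases hmin : PySem.List.min? xs (fun y => y) with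
  | none => exact absurd ((PySem.List.min?_eq_none_iff xs (fun y => y)).mp hmin) hxs
  | some k =>
    have hkmem : k ∈ xs := PySem.List.min?_mem hmin
    have hmmem : m ∈ xs := by
      have hm : m ∈ PySem.List.sorted xs (fun y => y) false := by
        rw [h]; exact List.mem_cons_self ..
      exact (PySem.List.mem_sorted xs (fun y => y) false m).mp hm
    have h1 : m ≤ k := PySem.List.key_head_sorted_le xs (fun y => y) h k hkmem
    have h2 : k ≤ m := PySem.List.min?_isMin hmin m hmmem
    exact congrArg some (le_antisymm h2 h1)

-- ===== VERDICT =====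
theorem get_career_earliest_year_spec : Claim_equal_get_career_earliest_year := by
  intro d _
  unfold Spec_get_career_earliest_year get_career_earliest_year get_career_earliest_year_alt
  rw [foldl_eq_omin_min?]
  cases h : PySem.List.sorted (d.flatMap (fun inst => (PySem.Dict.ofList inst).getD "Years" [])) (fun y => y) false with
  | nil =>
    have : d.flatMap (fun inst => (PySem.Dict.ofList inst).getD "Years" []) = [] :=
      (PySem.List.sorted_eq_nil_iff _ (fun y => y) false).mp h
    simp [this, min?_id_nil, omin]
  | cons m t =>
    rw [head_sorted_eq_min? _ _ _ h]
    rfl
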